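-- pv_equiv track=rewrite | github.com/NrupaChandra/Algoim_mimic | FNN/sorting.py | cut_one_record
-- ===== SOURCE A (Python) =====
-- def cut_one_record(buf):
--     """
--     Cut exactly one 'number;id;xs;ys;ws' record from buffer.
--     Looks for four semicolons and the closing ']' of the final array.
--     """
--     pos = []
--     start = 0
--     for _ in range(4):
--         k = buf.find(";", start)
--         if k == -1:
--             return None, buf
--         pos.append(k)
--         start = k + 1
--     end_w = buf.find("]", pos[3] + 1)
--     if end_w == -1:
--         return None, buf
--     return buf[:end_w + 1], buf[end_w + 1:]
-- ===== SOURCE B (Python) =====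
-- def cut_one_record(buf):
--     """
--     Cut exactly one 'number;id;xs;ys;ws' record from buffer.
--     Single left-to-right scan: count semicolons until four have been seen,
--     then the first ']' closes the record.
--     """
--     semis = 0
--     for i, c in enumerate(buf):
--         if semis < 4:
--             if c == ';':
--                 semis += 1
--         elif c == ']':
--             return buf[:i + 1], buf[i + 1:]
--     return None, buf
-- ===== Notes on version B (the rewrite author's own statement) =====
-- stated objective: alternative
-- what changed: Replaced the four str.find scans plus a fifth find for ']' by one single left-to-right character scan that counts semicolons in a state variable and stops at the first ']' after the fourth semicolon.
import Mathlib
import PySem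

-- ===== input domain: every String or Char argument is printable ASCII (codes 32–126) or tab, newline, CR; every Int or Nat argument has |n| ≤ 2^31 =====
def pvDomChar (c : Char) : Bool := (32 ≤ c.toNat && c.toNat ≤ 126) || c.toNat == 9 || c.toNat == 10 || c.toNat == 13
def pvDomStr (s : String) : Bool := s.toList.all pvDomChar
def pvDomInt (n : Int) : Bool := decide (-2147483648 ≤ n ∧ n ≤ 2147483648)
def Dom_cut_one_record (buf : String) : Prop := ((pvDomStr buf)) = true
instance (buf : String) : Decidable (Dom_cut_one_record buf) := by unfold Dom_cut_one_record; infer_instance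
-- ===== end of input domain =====

-- B replaces A's four str.find scans (plus a fifth for ']') by one single
-- left-to-right scan that counts semicolons and stops at the first ']' after
-- the fourth semicolon; same cost, different traversal (objective: alternative).

-- ===== PORT A =====
-- the `for _ in range(4)` loop of A: `n` iterations remaining, `pos` the
-- accumulated semicolon positions, `start` the next search start; `none` = the
-- early `return None, buf`.
def cutFindLoop (s : List Char) : Nat → List Int → Int → Option (List Int)
  | 0, pos, _ => some pos
  | n + 1, pos, start =>
    let k := PySem.Chars.findFrom s [';'] start
    if k = -1 then none
    else cutFindLoop s n (pos ++ [k]) (k + 1)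

def cut_one_record (buf : String) : Option String × String :=
  match cutFindLoop buf.toList 4 [] 0 with
  | none => (none, buf)
  | some pos =>
    let endW := PySem.Chars.findFrom buf.toList [']'] (PySem.List.pyGetD pos 3 0 + 1)
    if endW = -1 then (none, buf)
    else (some (PySem.Str.slice buf none (some (endW + 1))),
          PySem.Str.slice buf (some (endW + 1)) none)

-- ===== PORT B =====
-- the `for i, c in enumerate(buf)` loop of B with its `semis` counter.
def cutScan (buf : String) : List (Int × Char) → Nat → Option String × String
  | [], _ => (none, buf)
  | (i, c) :: rest, semis =>
    if semis < 4 then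
      if c = ';' then cutScan buf rest (semis + 1) else cutScan buf rest semis
    else if c = ']' then
      (some (PySem.Str.slice buf none (some (i + 1))),
       PySem.Str.slice buf (some (i + 1)) none)
    else cutScan buf rest semis

def cut_one_record_alt (buf : String) : Option String × String :=
  cutScan buf (PySem.List.enumerate buf.toList) 0

-- ===== PRECONDITION & SPEC =====
def Spec_cut_one_record (buf : String) (out : Option String × String) : Prop := out = cut_one_record_alt buf
instance (buf : String) (out : Option String × String) : Decidable (Spec_cut_one_record buf out) := by unfold Spec_cut_one_record; infer_instance

-- ===== CLAIM (what is proved, stated in full; the proofs are below) =====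
def Claim_equal_cut_one_record : Prop := ∀ (buf : String), Dom_cut_one_record buf → Spec_cut_one_record buf (cut_one_record buf)

-- ===== LEMMAS AND PROOFS =====

-- `[c] <+: t.drop n` means exactly "character c sits at index n of t".
theorem pv_prefix_drop_iff (t : List Char) (n : Nat) (c : Char) :
    [c] <+: t.drop n ↔ t[n]? = some c := by
  have hdrop : (t.drop n)[0]? = t[n]? := by simp [List.getElem?_drop]
  rw [List.cons_prefix_iff]
  constructor
  · rintro ⟨l', hl', -⟩
    rw [← hdrop, hl']; simp
  · intro hg
    rw [← hdrop] at hg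
    cases h : t.drop n with
    | nil => rw [h] at hg; simp at hg
    | cons a l =>
      rw [h] at hg; simp at hg
      exact ⟨l, by rw [hg], List.nil_prefix⟩

-- Chars.find with a single-character needle is List.findIdx?.
theorem pv_find_singleton (t : List Char) (c : Char) :
    PySem.Chars.find t [c] =
      (match t.findIdx? (· == c) with | none => -1 | some j => (j : Int)) := by
  cases h : t.findIdx? (· == c) with
  | none =>
    rw [PySem.Chars.find_eq_neg_one_iff, List.singleton_infix_iff]
    intro hc
    have := List.findIdx?_eq_none_iff.mp h c hc
    simp at this
  | some j =>
    obtain ⟨hj, hpj, hmin⟩ := List.findIdx?_eq_some_iff_getElem.mp h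
    have hjc : t[j] = c := by simpa using hpj
    have hmem : c ∈ t := hjc ▸ t.getElem_mem hj
    have hnn : 0 ≤ PySem.Chars.find t [c] := by
      rw [PySem.Chars.find_nonneg_iff, List.singleton_infix_iff]; exact hmem
    obtain ⟨hpre, hmin'⟩ := PySem.Chars.find_spec hnn
    have hf : t[(PySem.Chars.find t [c]).toNat]? = some c :=
      (pv_prefix_drop_iff t _ c).mp hpre
    have h1 : ¬ (PySem.Chars.find t [c]).toNat < j := by
      intro hlt
      have hmi := hmin (PySem.Chars.find t [c]).toNat hlt
      have hlt2 : (PySem.Chars.find t [c]).toNat < t.length :=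
        (List.getElem?_eq_some_iff.mp hf).1
      rw [List.getElem?_eq_getElem hlt2] at hf
      simp at hf
      simp [hf] at hmi
    have h2 : ¬ j < (PySem.Chars.find t [c]).toNat := by
      intro hlt
      exact hmin' j hlt ((pv_prefix_drop_iff t j c).mpr (by
        simp [List.getElem?_eq_getElem hj, hjc]))
    have heq : (PySem.Chars.find t [c]).toNat = j := by omega
    show PySem.Chars.find t [c] = (j : Int)
    omega

-- one step of A's find loop, expressed over the suffix t.drop k
theorem pv_loopA_step (s : List Char) (n : Nat) (pos : List Int) (k : Nat) (hk : k ≤ s.length) :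
    cutFindLoop s (n + 1) pos (k : Int) =
      (match (s.drop k).findIdx? (· == ';') with
       | none => none
       | some j => cutFindLoop s n (pos ++ [((k + j : Nat) : Int)]) ((k + j + 1 : Nat) : Int)) := by
  show (if PySem.Chars.findFrom s [';'] (k : Int) = -1 then none
        else cutFindLoop s n (pos ++ [PySem.Chars.findFrom s [';'] (k : Int)])
               (PySem.Chars.findFrom s [';'] (k : Int) + 1)) = _
  rw [PySem.Chars.findFrom_natCast s [';'] k hk, pv_find_singleton]
  cases h : (s.drop k).findIdx? (· == ';') with
  | none => simp
  | some j =>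
    have hj1 : ((j : Int)) ≠ -1 := by omega
    have hne : ((k : Int) + (j : Int)) ≠ -1 := by omega
    simp [hj1, hne]

-- B's scan while fewer than four semicolons have been seen: it runs to the
-- first ';' of the remaining suffix (or the end of the input).
theorem pv_scanB_lt (buf : String) (t : List Char) (k : Nat) (semis : Nat) (h : semis < 4) :
    cutScan buf (PySem.List.enumerate t (k : Int)) semis =
      (match t.findIdx? (· == ';') with
       | none => (none, buf)
       | some j => cutScan buf (PySem.List.enumerate (t.drop (j + 1)) ((k + j + 1 : Nat) : Int)) (semis + 1)) := by
  induction t generalizing k with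
  | nil => simp [PySem.List.enumerate, cutScan]
  | cons a t ih =>
    rw [show PySem.List.enumerate (a :: t) (k : Int) = ((k : Int), a) :: PySem.List.enumerate t ((k + 1 : Nat) : Int) by
      push_cast; simp [PySem.List.enumerate]]
    by_cases ha : a = ';'
    · simp [cutScan, h, ha, List.findIdx?_cons]
    · rw [show cutScan buf (((k : Int), a) :: PySem.List.enumerate t ((k + 1 : Nat) : Int)) semis
            = cutScan buf (PySem.List.enumerate t ((k + 1 : Nat) : Int)) semis by
        simp [cutScan, h, ha]]
      rw [ih (k + 1)]
      cases hf : t.findIdx? (· == ';') with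
      | none => simp [List.findIdx?_cons, ha, hf]
      | some j =>
        simp only [List.findIdx?_cons, show (a == ';') = false by simp [ha], hf]
        simp only [Option.map_some]
        have : k + 1 + j + 1 = k + (j + 1) + 1 := by omega
        rw [this]; simp

-- B's scan once four semicolons have been seen: it runs to the first ']'.
theorem pv_scanB_done (buf : String) (t : List Char) (k : Nat) :
    cutScan buf (PySem.List.enumerate t (k : Int)) 4 =
      (match t.findIdx? (· == ']') with
       | none => (none, buf)
       | some j => (some (PySem.Str.slice buf none (some ((k + j + 1 : Nat) : Int))),
                    PySem.Str.slice buf (some ((k + j + 1 : Nat) : Int)) none)) := by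
  induction t generalizing k with
  | nil => simp [PySem.List.enumerate, cutScan]
  | cons a t ih =>
    rw [show PySem.List.enumerate (a :: t) (k : Int) = ((k : Int), a) :: PySem.List.enumerate t ((k + 1 : Nat) : Int) by
      push_cast; simp [PySem.List.enumerate]]
    by_cases ha : a = ']'
    · simp [cutScan, ha, List.findIdx?_cons]
    · rw [show cutScan buf (((k : Int), a) :: PySem.List.enumerate t ((k + 1 : Nat) : Int)) 4
            = cutScan buf (PySem.List.enumerate t ((k + 1 : Nat) : Int)) 4 by
        simp [cutScan, ha]]
      rw [ih (k + 1)]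
      cases hf : t.findIdx? (· == ']') with
      | none => simp [List.findIdx?_cons, ha, hf]
      | some j =>
        simp only [List.findIdx?_cons, show (a == ']') = false by simp [ha], hf]
        simp only [Option.map_some]
        have : k + 1 + j + 1 = k + (j + 1) + 1 := by omega
        rw [this]; simp

theorem pv_findIdx?_lt (t : List Char) (p : Char → Bool) (j : Nat) (h : t.findIdx? p = some j) :
    j < t.length :=
  (List.findIdx?_eq_some_iff_getElem.mp h).1

-- the two programs in lockstep: after A has found `4 - n` semicolons (the
-- last one, if any, at absolute index k - 1) the rest of A's computation
-- equals B's scan of the remaining suffix with `4 - n` semicolons counted.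
theorem pv_bridge (buf : String) (n : Nat) (hn : n ≤ 4) (pos : List Int)
    (hpos : pos.length = 4 - n) (k : Nat) (hk : k ≤ buf.toList.length)
    (h34 : n = 0 → PySem.List.pyGetD pos 3 0 + 1 = (k : Int)) :
    (match cutFindLoop buf.toList n pos (k : Int) with
     | none => (none, buf)
     | some pos' =>
       let endW := PySem.Chars.findFrom buf.toList [']'] (PySem.List.pyGetD pos' 3 0 + 1)
       if endW = -1 then (none, buf)
       else (some (PySem.Str.slice buf none (some (endW + 1))),
             PySem.Str.slice buf (some (endW + 1)) none)) =
    cutScan buf (PySem.List.enumerate (buf.toList.drop k) (k : Int)) (4 - n) := by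
  induction n generalizing pos k with
  | zero =>
    rw [pv_scanB_done]
    show (let endW := PySem.Chars.findFrom buf.toList [']'] (PySem.List.pyGetD pos 3 0 + 1);
          if endW = -1 then (none, buf)
          else (some (PySem.Str.slice buf none (some (endW + 1))),
                PySem.Str.slice buf (some (endW + 1)) none)) = _
    rw [h34 rfl, PySem.Chars.findFrom_natCast buf.toList [']'] k hk, pv_find_singleton]
    cases hf : (buf.toList.drop k).findIdx? (· == ']') with
    | none => simp
    | some j =>
      have hj1 : ((j : Int)) ≠ -1 := by omega
      have hne : ((k : Int) + (j : Int)) ≠ -1 := by omega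
      simp [hj1, hne]
  | succ n ih =>
    rw [pv_loopA_step buf.toList n pos k hk]
    rw [pv_scanB_lt buf (buf.toList.drop k) k (4 - (n + 1)) (by omega)]
    cases hf : (buf.toList.drop k).findIdx? (· == ';') with
    | none => simp
    | some j =>
      have hjlt : j < (buf.toList.drop k).length := pv_findIdx?_lt _ _ j hf
      have hklen : k + j + 1 ≤ buf.toList.length := by
        rw [List.length_drop] at hjlt; omega
      show _ = cutScan buf (PySem.List.enumerate ((buf.toList.drop k).drop (j + 1)) ((k + j + 1 : Nat) : Int)) (4 - (n + 1) + 1)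
      rw [List.drop_drop, show k + (j + 1) = k + j + 1 by omega,
          show 4 - (n + 1) + 1 = 4 - n by omega]
      rw [← ih (by omega) (pos ++ [((k + j : Nat) : Int)])
            (by simp only [List.length_append, List.length_cons, List.length_nil, hpos]; omega)
            (k + j + 1) hklen ?_]
      intro hn0
      subst hn0
      have h3 : pos.length = 3 := by omega
      rcases pos with _ | ⟨a, _ | ⟨b, _ | ⟨c, _ | ⟨d, l⟩⟩⟩⟩ <;> simp at h3
      simp [PySem.List.pyGetD, PySem.List.pyGet?, PySem.List.pyIdx?]

-- ===== VERDICT (by name: the statement is the Claim_ definition above) =====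
theorem cut_one_record_spec : Claim_equal_cut_one_record := by
  intro buf _
  unfold Spec_cut_one_record cut_one_record cut_one_record_alt
  have h := pv_bridge buf 4 (by omega) [] (by simp) 0 (by omega) (by omega)
  rw [List.drop_zero] at h
  simpa using h
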